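-- pv_equiv track=rewrite | github.com/anushkachauhxn/rosalind-bioinformatics | 4-FIB.py | recurrenceRabits
-- ===== SOURCE A (Python) =====
-- def recurrenceRabits(n, k):
--     f1 = 1
--     f2 = 1
--     for _ in range(3, n+1):
--         f3 = f2 + f1*k
--         f1 = f2
--         f2 = f3
--     return (f2)
-- ===== SOURCE B (Python) =====
-- def recurrenceRabits(n, k):
--     # Matrix exponentiation: [[1,k],[1,0]]^(n-2) applied to the all-ones start vector.
--     if n < 3:
--         return 1
--     def mul(A, B):
--         (a, b), (c, d) = A
--         (e, f), (g, h) = B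
--         return ((a * e + b * g, a * f + b * h), (c * e + d * g, c * f + d * h))
--     base = ((1, k), (1, 0))
--     P = ((1, 0), (0, 1))
--     e = n - 2
--     while e:
--         if e & 1:
--             P = mul(base, P)
--         base = mul(base, base)
--         e >>= 1
--     return P[0][0] + P[0][1]
-- ===== Notes on version B (the rewrite author's own statement) =====
-- stated objective: alternative
-- what changed: Replaced the linear loop over the recurrence with 2x2 matrix exponentiation by squaring of [[1,k],[1,0]] applied to the all-ones start vector; O(log n) matrix multiplies instead of O(n) steps, though bigint growth keeps measured wall time comparable.
import Mathlib
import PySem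

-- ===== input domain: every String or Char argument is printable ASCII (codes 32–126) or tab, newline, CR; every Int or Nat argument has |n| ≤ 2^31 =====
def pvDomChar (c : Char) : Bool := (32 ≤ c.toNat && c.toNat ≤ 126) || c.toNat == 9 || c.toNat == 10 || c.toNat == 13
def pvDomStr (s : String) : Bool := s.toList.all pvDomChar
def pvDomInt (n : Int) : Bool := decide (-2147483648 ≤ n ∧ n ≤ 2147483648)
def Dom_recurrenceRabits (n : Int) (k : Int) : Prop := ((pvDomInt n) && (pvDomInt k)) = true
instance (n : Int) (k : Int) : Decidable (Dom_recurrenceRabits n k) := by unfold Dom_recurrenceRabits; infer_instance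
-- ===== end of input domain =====

-- B replaces A's step-by-step iteration of the recurrence by 2×2 matrix exponentiation
-- by squaring (an alternative algorithm; equivalence of the return values is proved for
-- all inputs in the domain — both programs are total).

-- ===== PORT A =====
-- state (f1, f2); one loop body: f3 = f2 + f1*k; f1 = f2; f2 = f3
def recurrenceRabits (n : Int) (k : Int) : Int :=
  ((PySem.List.pyRange 3 (n+1) 1).foldl
    (fun (s : Int × Int) _ => (s.2, s.2 + s.1 * k)) (1, 1)).2

-- ===== PORT B =====
-- 2×2 matrix ((a,b),(c,d)) = [[a,b],[c,d]]
def pvMul (A B : (Int × Int) × (Int × Int)) : (Int × Int) × (Int × Int) :=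
  ((A.1.1 * B.1.1 + A.1.2 * B.2.1, A.1.1 * B.1.2 + A.1.2 * B.2.2),
   (A.2.1 * B.1.1 + A.2.2 * B.2.1, A.2.1 * B.1.2 + A.2.2 * B.2.2))

-- the `while e:` loop of Source B: square-and-multiply with accumulator P, e halving
def pvPowLoop (base P : (Int × Int) × (Int × Int)) (e : Nat) :
    (Int × Int) × (Int × Int) :=
  if e = 0 then P
  else pvPowLoop (pvMul base base) (if e % 2 = 1 then pvMul base P else P) (e / 2)
  termination_by e
  decreasing_by exact Nat.div_lt_self (Nat.pos_of_ne_zero (by assumption)) (by norm_num)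

def recurrenceRabits_alt (n : Int) (k : Int) : Int :=
  if n < 3 then 1
  else
    let P := pvPowLoop ((1, k), (1, 0)) ((1, 0), (0, 1)) (n - 2).toNat
    P.1.1 + P.1.2

-- ===== PRECONDITION & SPEC =====
def Spec_recurrenceRabits (n : Int) (k : Int) (out : Int) : Prop := out = recurrenceRabits_alt n k
instance (n : Int) (k : Int) (out : Int) : Decidable (Spec_recurrenceRabits n k out) := by unfold Spec_recurrenceRabits; infer_instance

-- ===== CLAIM (what is proved, stated in full; the proofs are below) =====
def Claim_equal_recurrenceRabits : Prop := ∀ (n : Int) (k : Int), Dom_recurrenceRabits n k → Spec_recurrenceRabits n k (recurrenceRabits n k)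

-- ===== LEMMAS AND PROOFS =====

-- reference: e-fold left multiplication by `base`
def pvIter (base : (Int × Int) × (Int × Int)) : Nat → (Int × Int) × (Int × Int)
  | 0 => ((1, 0), (0, 1))
  | e + 1 => pvMul base (pvIter base e)

theorem pvMul_assoc (A B C : (Int × Int) × (Int × Int)) :
    pvMul (pvMul A B) C = pvMul A (pvMul B C) := by
  simp only [pvMul, Prod.mk.injEq]
  refine ⟨⟨by ring, by ring⟩, by ring, by ring⟩

theorem pvMul_one_left (A : (Int × Int) × (Int × Int)) :
    pvMul ((1, 0), (0, 1)) A = A := by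
  obtain ⟨⟨a, b⟩, c, d⟩ := A; simp [pvMul]

theorem pvMul_one_right (A : (Int × Int) × (Int × Int)) :
    pvMul A ((1, 0), (0, 1)) = A := by
  obtain ⟨⟨a, b⟩, c, d⟩ := A; simp [pvMul]

theorem pvIter_succ_right (b : (Int × Int) × (Int × Int)) (e : Nat) :
    pvIter b (e + 1) = pvMul (pvIter b e) b := by
  induction e with
  | zero => simp [pvIter, pvMul_one_left, pvMul_one_right]
  | succ m ih =>
      calc pvIter b (m + 2) = pvMul b (pvIter b (m + 1)) := rfl
        _ = pvMul b (pvMul (pvIter b m) b) := by rw [ih]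
        _ = pvMul (pvMul b (pvIter b m)) b := (pvMul_assoc ..).symm
        _ = pvMul (pvIter b (m + 1)) b := rfl

theorem pvIter_sq (b : (Int × Int) × (Int × Int)) (m : Nat) :
    pvIter (pvMul b b) m = pvIter b (2 * m) := by
  induction m with
  | zero => rfl
  | succ t ih =>
      have h2 : 2 * (t + 1) = (2 * t + 1) + 1 := by ring
      calc pvIter (pvMul b b) (t + 1)
          = pvMul (pvMul b b) (pvIter b (2 * t)) := by rw [pvIter, ih]
        _ = pvMul b (pvMul b (pvIter b (2 * t))) := pvMul_assoc ..
        _ = pvIter b ((2 * t + 1) + 1) := rfl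
        _ = pvIter b (2 * (t + 1)) := by rw [h2]

theorem pvPowLoop_eq (b P : (Int × Int) × (Int × Int)) (e : Nat) :
    pvPowLoop b P e = pvMul (pvIter b e) P := by
  induction e using Nat.strong_induction_on generalizing b P with
  | _ e ih =>
    rw [pvPowLoop]
    by_cases h0 : e = 0
    · simp [h0, pvIter, pvMul_one_left]
    · simp only [h0, if_false]
      have hlt : e / 2 < e := Nat.div_lt_self (Nat.pos_of_ne_zero h0) (by norm_num)
      rw [ih _ hlt, pvIter_sq]
      by_cases hodd : e % 2 = 1
      · simp only [hodd, if_true]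
        rw [← pvMul_assoc, ← pvIter_succ_right,
          show 2 * (e / 2) + 1 = e from by omega]
      · simp only [hodd, if_false]
        rw [show 2 * (e / 2) = e from by omega]

-- A's loop body ignores the loop variable: foldl is function iteration of the step
theorem foldl_const_iterate {α β : Type} (f : α → α) (l : List β) (s : α) :
    l.foldl (fun a _ => f a) s = f^[l.length] s := by
  induction l generalizing s with
  | nil => rfl
  | cons x xs ih => simp [List.foldl, ih, Function.iterate_succ_apply]

-- the bridge: row sums of pvIter of M = [[1,k],[1,0]] track A's loop state
theorem pvIter_state (k : Int) (e : Nat) :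
    (pvIter ((1, k), (1, 0)) e).1.1 + (pvIter ((1, k), (1, 0)) e).1.2 =
      ((fun (s : Int × Int) => (s.2, s.2 + s.1 * k))^[e] ((1 : Int), (1 : Int))).2 ∧
    (pvIter ((1, k), (1, 0)) e).2.1 + (pvIter ((1, k), (1, 0)) e).2.2 =
      ((fun (s : Int × Int) => (s.2, s.2 + s.1 * k))^[e] ((1 : Int), (1 : Int))).1 := by
  induction e with
  | zero => simp [pvIter]
  | succ m ih =>
      obtain ⟨h1, h2⟩ := ih
      simp only [pvIter, pvMul, Function.iterate_succ_apply']
      refine ⟨?_, ?_⟩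
      · linear_combination h1 + k * h2
      · linear_combination h1

theorem recurrenceRabits_eq_iterate (n k : Int) :
    recurrenceRabits n k =
      ((fun (s : Int × Int) => (s.2, s.2 + s.1 * k))^[(n - 2).toNat] ((1 : Int), 1)).2 := by
  unfold recurrenceRabits
  rw [foldl_const_iterate]
  congr 2
  rw [PySem.List.length_pyRange_one]
  congr 1
  omega

-- ===== VERDICT (by name: the statement is the Claim_ definition above) =====
theorem recurrenceRabits_spec : Claim_equal_recurrenceRabits := by
  intro n k _
  unfold Spec_recurrenceRabits recurrenceRabits_alt
  rw [recurrenceRabits_eq_iterate]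
  by_cases h : n < 3
  · have : (n - 2).toNat = 0 := by omega
    simp [h, this]
  · simp only [h, if_false]
    rw [pvPowLoop_eq]
    obtain ⟨h1, _⟩ := pvIter_state k (n - 2).toNat
    simp only [pvMul]
    linarith [h1]
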